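-- pv_equiv track=rewrite | github.com/rajasekhar02/reading-x-source-code | Complete Reference/Graphs/Trees/leetcode_3068.py | maximumValueSumGreedy
-- ===== SOURCE A (Python) =====
-- from typing import List
--
-- def maximumValueSumGreedy(nums: List[int], k: int, edges: List[List[int]]) -> int:
--     # so in this problem the edges array is not needed
--     # due to the fact that we can pair any two nodes and perform the XOR operations
--     # and the nodes in between this pair will remain unchanged after performing the action
--     n = len(nums)
--     netChange = [(nums[i]^k)-nums[i] for i in range(n)]
--     nodeSum = sum(nums)
--     netChange.sort(reverse=True)
--     for i in range(0, n, 2):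
--         # If netChange contains odd number of elements break the loop
--         if i+1 == n:
--             break
--         pairSum = netChange[i] + netChange[i+1]
--         # Include in nodeSum if pairSum is positive
--         if pairSum > 0:
--             nodeSum += pairSum
--
--     return nodeSum
-- ===== SOURCE B (Python) =====
-- from typing import List
--
-- def maximumValueSumGreedy(nums: List[int], k: int, edges: List[List[int]]) -> int:
--     # One pass, no sort: sum the positive XOR-deltas; if an odd number of them
--     # is positive, restore parity by dropping the smallest positive delta or
--     # adding the largest non-positive one, whichever is better.
--     total = 0
--     posSum = 0
--     cnt = 0
--     minPos = None
--     maxNonPos = None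
--     for x in nums:
--         total += x
--         d = (x ^ k) - x
--         if d > 0:
--             posSum += d
--             cnt += 1
--             if minPos is None or d < minPos:
--                 minPos = d
--         else:
--             if maxNonPos is None or d > maxNonPos:
--                 maxNonPos = d
--     if cnt % 2 == 0:
--         return total + posSum
--     best = posSum - minPos
--     if maxNonPos is not None and posSum + maxNonPos > best:
--         best = posSum + maxNonPos
--     return total + best
-- ===== Notes on version B (the rewrite author's own statement) =====
-- stated objective: faster
-- what changed: Replaced sort-then-pair-adjacent-deltas with a single pass that sums the positive XOR-deltas and fixes odd parity by dropping the smallest positive delta or adding the largest non-positive one, removing the O(n log n) sort.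
import Mathlib
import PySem

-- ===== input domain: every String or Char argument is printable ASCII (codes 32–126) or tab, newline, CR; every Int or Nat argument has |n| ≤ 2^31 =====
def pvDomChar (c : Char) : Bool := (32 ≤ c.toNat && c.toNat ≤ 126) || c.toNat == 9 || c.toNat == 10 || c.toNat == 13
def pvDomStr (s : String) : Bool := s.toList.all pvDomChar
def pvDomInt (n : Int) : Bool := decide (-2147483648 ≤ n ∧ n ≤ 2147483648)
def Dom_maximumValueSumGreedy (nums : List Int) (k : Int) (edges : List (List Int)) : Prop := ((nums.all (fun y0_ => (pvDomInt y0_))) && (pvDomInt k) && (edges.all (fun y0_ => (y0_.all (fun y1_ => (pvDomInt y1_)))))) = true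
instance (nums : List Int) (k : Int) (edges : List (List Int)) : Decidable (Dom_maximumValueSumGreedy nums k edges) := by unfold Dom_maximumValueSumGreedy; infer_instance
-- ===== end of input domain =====

-- B replaces A's sort-then-pair-adjacent-deltas scheme by a single pass that sums
-- the positive XOR-deltas and fixes odd parity via the smallest positive /
-- largest non-positive delta (objective: faster, the sort disappears).

-- ===== PORT A =====
-- the body of A's 'for i in range(0, n, 2)' loop (state = (broken?, nodeSum))
def pvAStep (n : Int) (nc : List Int) (st : Bool × Int) (i : Int) : Bool × Int :=
  if st.1 then st
  else if i + 1 = n then (true, st.2)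
  else
    let pairSum := PySem.List.pyGetD nc i 0 + PySem.List.pyGetD nc (i + 1) 0
    if 0 < pairSum then (st.1, st.2 + pairSum) else st

def maximumValueSumGreedy (nums : List Int) (k : Int) (edges : List (List Int)) : Int :=
  let n : Int := (nums.length : Int)
  let netChange : List Int :=
    (PySem.List.pyRange 0 n 1).map
      (fun i => PySem.Int.bxor (PySem.List.pyGetD nums i 0) k - PySem.List.pyGetD nums i 0)
  let nodeSum : Int := nums.sum
  let nc := PySem.List.sorted netChange (fun x => x) true
  ((PySem.List.pyRange 0 n 2).foldl (pvAStep n nc) (false, nodeSum)).2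

-- ===== PORT B =====
-- the body of B's single 'for x in nums' loop
-- (state = (total, posSum, cnt, minPos, maxNonPos))
def pvBStep (k : Int) (st : Int × Int × Int × Option Int × Option Int) (x : Int) :
    Int × Int × Int × Option Int × Option Int :=
  let total := st.1 + x
  let d := PySem.Int.bxor x k - x
  if 0 < d then
    let minPos : Option Int :=
      match st.2.2.2.1 with
      | none => some d
      | some m => if d < m then some d else some m
    (total, st.2.1 + d, st.2.2.1 + 1, minPos, st.2.2.2.2)
  else
    let maxNonPos : Option Int :=
      match st.2.2.2.2 with
      | none => some d
      | some m => if m < d then some d else some m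
    (total, st.2.1, st.2.2.1, st.2.2.2.1, maxNonPos)

def maximumValueSumGreedy_alt (nums : List Int) (k : Int) (edges : List (List Int)) : Int :=
  let st := nums.foldl (pvBStep k) (0, 0, 0, none, none)
  let total := st.1
  let posSum := st.2.1
  let cnt := st.2.2.1
  let minPos := st.2.2.2.1
  let maxNonPos := st.2.2.2.2
  if PySem.Int.mod cnt 2 = 0 then total + posSum
  else
    -- when cnt is odd, minPos is necessarily 'some' (Python never reads None here)
    let best := posSum - minPos.getD 0
    let best :=
      match maxNonPos with
      | some m => if best < posSum + m then posSum + m else best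
      | none => best
    total + best

-- ===== PRECONDITION & SPEC =====
def Spec_maximumValueSumGreedy (nums : List Int) (k : Int) (edges : List (List Int)) (out : Int) : Prop := out = maximumValueSumGreedy_alt nums k edges
instance (nums : List Int) (k : Int) (edges : List (List Int)) (out : Int) : Decidable (Spec_maximumValueSumGreedy nums k edges out) := by unfold Spec_maximumValueSumGreedy; infer_instance

-- ===== CLAIM (what is proved, stated in full; the proofs are below) =====
def Claim_equal_maximumValueSumGreedy : Prop := ∀ (nums : List Int) (k : Int) (edges : List (List Int)), Dom_maximumValueSumGreedy nums k edges → Spec_maximumValueSumGreedy nums k edges (maximumValueSumGreedy nums k edges)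

-- ===== LEMMAS AND PROOFS =====

-- A's loop on the sorted list, read structurally: it consumes two elements at a time
def pairLoop : List Int → Int
  | [] => 0
  | [_] => 0
  | a :: b :: t => (if 0 < a + b then a + b else 0) + pairLoop t

-- the common value, expressed through the positive / non-positive deltas
def pvT (l : List Int) : Int :=
  let P := l.filter (fun x => decide (0 < x))
  if P.length % 2 = 0 then P.sum
  else
    let best := P.sum - (P.min?).getD 0
    match (l.filter (fun x => !decide (0 < x))).max? with
    | some m => if best < P.sum + m then P.sum + m else best
    | none => best

theorem pvRange_two_nil (a b : Int) (h : b ≤ a) : PySem.List.pyRange a b 2 = [] := by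
  rw [PySem.List.pyRange_of_pos a b (by norm_num)]
  rw [if_neg (by omega)]
  simp

theorem pvRange_two_cons (a b : Int) (h : a < b) :
    PySem.List.pyRange a b 2 = a :: PySem.List.pyRange (a + 2) b 2 := by
  rw [PySem.List.pyRange_of_pos a b (by norm_num), PySem.List.pyRange_of_pos (a+2) b (by norm_num)]
  rw [if_pos h]
  have hc : ((b - a + 2 - 1) / 2).toNat
      = (if a + 2 < b then ((b - (a + 2) + 2 - 1) / 2).toNat else 0) + 1 := by
    split_ifs with h2 <;> omega
  rw [hc, List.range_succ_eq_map]
  simp only [List.map_cons, List.map_map]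
  congr 1
  · simp
  · apply List.map_congr_left
    intro i _
    simp [Function.comp, Nat.succ_eq_add_one]
    ring

-- A's indexed step-2 loop over L equals the structural pair loop over the not-yet-visited suffix
theorem pvBridge (L : List Int) (rest : List Int) : ∀ (a s : Int), 0 ≤ a →
    a.toNat + rest.length = L.length → rest = L.drop a.toNat →
    ((PySem.List.pyRange a (L.length : Int) 2).foldl (pvAStep (L.length : Int) L) (false, s)).2
      = s + pairLoop rest := by
  induction rest using pairLoop.induct with
  | case1 =>
    intro a s ha hlen _
    rw [pvRange_two_nil a _ (by simp at hlen; omega)]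
    simp [pairLoop]
  | case2 x =>
    intro a s ha hlen _
    have hab : a < (L.length : Int) := by simp at hlen; omega
    rw [pvRange_two_cons a _ hab, pvRange_two_nil (a+2) _ (by simp at hlen ⊢; omega)]
    simp only [List.foldl_cons, List.foldl_nil]
    have : pvAStep (L.length : Int) L (false, s) a = (true, s) := by
      simp only [pvAStep]
      rw [if_neg (by simp), if_pos (by simp at hlen ⊢; omega)]
    rw [this]
    simp [pairLoop]
  | case3 x y t ih =>
    intro a s ha hlen hdrop
    simp only [List.length_cons] at hlen
    have hlt : a.toNat + 2 + t.length = L.length := by omega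
    have hab : a < (L.length : Int) := by omega
    have hne : ¬ (a + 1 = (L.length : Int)) := by omega
    have hx : PySem.List.pyGetD L a 0 = x := by
      rw [PySem.List.pyGetD_eq_getElem L 0 ha (by exact_mod_cast hab)]
      have h0 : (L.drop a.toNat)[0]'(by rw [← hdrop]; simp) = x := by
        simp [← hdrop]
      rw [List.getElem_drop] at h0
      simpa using h0
    have hy : PySem.List.pyGetD L (a + 1) 0 = y := by
      rw [PySem.List.pyGetD_eq_getElem L 0 (by omega) (by push_cast; omega)]
      have h1 : (L.drop a.toNat)[1]'(by rw [← hdrop]; simp) = y := by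
        simp [← hdrop]
      rw [List.getElem_drop] at h1
      have : (a + 1).toNat = a.toNat + 1 := by omega
      simp only [this]
      exact h1
    have hstep : ∀ b : Bool, b = false → pvAStep (L.length : Int) L (b, s) a
        = (false, s + (if 0 < x + y then x + y else 0)) := by
      intro b hb
      subst hb
      simp only [pvAStep]
      rw [if_neg (by simp), if_neg hne, hx, hy]
      split_ifs <;> simp
    rw [pvRange_two_cons a _ hab]
    simp only [List.foldl_cons]
    rw [hstep false rfl]
    have hdrop2 : t = L.drop (a + 2).toNat := by
      have h2 : (a + 2).toNat = a.toNat + 2 := by omega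
      rw [h2, ← List.drop_drop, ← hdrop]
      rfl
    rw [ih (a + 2) _ (by omega) (by omega) hdrop2]
    simp [pairLoop]
    ring

theorem pvT_nonpos (l : List Int) (h : ∀ z ∈ l, z ≤ 0) : pvT l = 0 := by
  have hP : l.filter (fun x => decide (0 < x)) = [] := by
    rw [List.filter_eq_nil_iff]
    intro z hz
    simpa using (by have := h z hz; omega : ¬ (0 < z))
  simp [pvT, hP]

theorem pairLoop_nonpos (l : List Int) (h : ∀ z ∈ l, z ≤ 0) : pairLoop l = 0 := by
  induction l using pairLoop.induct with
  | case1 => rfl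
  | case2 x => rfl
  | case3 x y t ih =>
    have hx := h x (by simp)
    have hy := h y (by simp)
    rw [pairLoop, if_neg (by omega), ih (fun z hz => h z (by simp [hz]))]
    norm_num

-- the heart of the equivalence: on a descending list, A's adjacent pairing
-- computes exactly the positive-sum-with-parity-fix value
theorem pairLoop_eq_pvT (l : List Int) (hs : l.Pairwise (fun a b => b ≤ a)) :
    pairLoop l = pvT l := by
  induction l using pairLoop.induct with
  | case1 => simp [pairLoop, pvT]
  | case2 x =>
    by_cases hx : 0 < x
    · simp [pairLoop, pvT, hx]
    · simp [pairLoop, pvT, hx]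
  | case3 x y t ih =>
    rw [List.pairwise_cons] at hs
    obtain ⟨hxall, hs2⟩ := hs
    rw [List.pairwise_cons] at hs2
    obtain ⟨hyall, hst⟩ := hs2
    have hyx : y ≤ x := hxall y (by simp)
    by_cases hy : 0 < y
    · -- both heads positive: the pair is added on both sides
      have hx : 0 < x := by omega
      have hPl : (x :: y :: t).filter (fun z => decide (0 < z))
          = x :: y :: t.filter (fun z => decide (0 < z)) := by
        simp [hx, hy]
      have hNl : (x :: y :: t).filter (fun z => !decide (0 < z))
          = t.filter (fun z => !decide (0 < z)) := by
        simp [hx, hy]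
      rw [pairLoop, if_pos (by omega), ih hst]
      set Pt := t.filter (fun z => decide (0 < z)) with hPt
      set Nt := t.filter (fun z => !decide (0 < z)) with hNt
      simp only [pvT, hPl, hNl]
      simp only [List.length_cons, List.sum_cons]
      have hpar : (Pt.length + 1 + 1) % 2 = Pt.length % 2 := by omega
      rw [hpar]
      by_cases hev : Pt.length % 2 = 0
      · rw [if_pos hev, if_pos hev]; ring
      · rw [if_neg hev, if_neg hev]
        have hPtne : Pt ≠ [] := by
          intro hnil
          rw [hnil] at hev
          simp at hev
        obtain ⟨m, hm⟩ : ∃ m, Pt.min? = some m := by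
          cases hmm : Pt.min? with
          | none => exact absurd (List.min?_eq_none_iff.mp hmm) hPtne
          | some m => exact ⟨m, rfl⟩
        obtain ⟨hmmem, hmle⟩ := List.min?_eq_some_iff.mp hm
        have hmt : m ∈ t := (List.mem_filter.mp hmmem).1
        have hmy : m ≤ y := hyall m hmt
        have hmin2 : (x :: y :: Pt).min? = some m := by
          rw [List.min?_eq_some_iff]
          constructor
          · simp [hmmem]
          · intro b hb
            rcases List.mem_cons.mp hb with rfl | hb
            · omega
            rcases List.mem_cons.mp hb with rfl | hb
            · omega
            exact hmle b hb
        rw [hmin2, hm]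
        cases hmax : Nt.max? with
        | none =>
          simp only [Option.getD_some]
          ring
        | some w =>
          simp only [Option.getD_some]
          split_ifs with h1 h2 h2
          · ring
          · exfalso; omega
          · exfalso; omega
          · ring
    · -- y ≤ 0: everything after x is non-positive
      have htnp : ∀ z ∈ t, z ≤ 0 := fun z hz => le_trans (hyall z hz) (by omega)
      have hNt : t.filter (fun z => !decide (0 < z)) = t := by
        rw [List.filter_eq_self]
        intro z hz
        simpa using (by have := htnp z hz; omega : ¬ (0 < z))
      have hPt : t.filter (fun z => decide (0 < z)) = [] := by
        rw [List.filter_eq_nil_iff]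
        intro z hz
        simpa using (by have := htnp z hz; omega : ¬ (0 < z))
      have hploop : pairLoop t = 0 := pairLoop_nonpos t htnp
      by_cases hx : 0 < x
      · -- P = [x], N headed by y, whose maximum is y
        have hPl : (x :: y :: t).filter (fun z => decide (0 < z)) = [x] := by
          simp [hx, hy, hPt]
        have hNl : (x :: y :: t).filter (fun z => !decide (0 < z)) = y :: t := by
          simp [hx, hy, hNt]
        have hmax : (y :: t).max? = some y := by
          rw [List.max?_eq_some_iff]
          refine ⟨by simp, ?_⟩
          intro b hb
          rcases List.mem_cons.mp hb with rfl | hb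
          · omega
          exact hyall b hb
        rw [pairLoop, hploop]
        simp only [pvT, hPl, hNl, hmax]
        norm_num
      · -- the whole list is non-positive
        have hall : ∀ z ∈ x :: y :: t, z ≤ 0 := by
          intro z hz
          rcases List.mem_cons.mp hz with rfl | hz
          · omega
          rcases List.mem_cons.mp hz with rfl | hz
          · omega
          exact htnp z hz
        rw [pairLoop_nonpos _ hall, pvT_nonpos _ hall]

theorem pvPerm_min? (l1 l2 : List Int) (h : l1.Perm l2) : l1.min? = l2.min? := by
  cases e1 : l1.min? with
  | none =>
    rw [List.min?_eq_none_iff] at e1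
    subst e1
    rw [h.symm.eq_nil]
    rfl
  | some m =>
    obtain ⟨hm, hle⟩ := List.min?_eq_some_iff.mp e1
    symm
    rw [List.min?_eq_some_iff]
    exact ⟨h.mem_iff.mp hm, fun b hb => hle b (h.mem_iff.mpr hb)⟩

theorem pvPerm_max? (l1 l2 : List Int) (h : l1.Perm l2) : l1.max? = l2.max? := by
  cases e1 : l1.max? with
  | none =>
    rw [List.max?_eq_none_iff] at e1
    subst e1
    rw [h.symm.eq_nil]
    rfl
  | some m =>
    obtain ⟨hm, hle⟩ := List.max?_eq_some_iff.mp e1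
    symm
    rw [List.max?_eq_some_iff]
    exact ⟨h.mem_iff.mp hm, fun b hb => hle b (h.mem_iff.mpr hb)⟩

theorem pvT_perm (l1 l2 : List Int) (h : l1.Perm l2) : pvT l1 = pvT l2 := by
  have hP := h.filter (fun x => decide (0 < x))
  have hN := h.filter (fun x => !decide (0 < x))
  simp only [pvT]
  rw [hP.length_eq, hP.sum_eq, pvPerm_min? _ _ hP, pvPerm_max? _ _ hN]

-- B-side: the running min/max updates, isolated
def pvUpdMin (o : Option Int) (d : Int) : Option Int :=
  match o with
  | none => some d
  | some m => if d < m then some d else some m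

def pvUpdMax (o : Option Int) (d : Int) : Option Int :=
  match o with
  | none => some d
  | some m => if m < d then some d else some m

theorem pvUpdMin_some (m d : Int) : pvUpdMin (some m) d = some (min m d) := by
  simp only [pvUpdMin]
  by_cases h : m ≤ d
  · rw [if_neg (by omega), min_eq_left h]
  · rw [if_pos (by omega), min_eq_right (by omega)]

theorem pvUpdMax_some (m d : Int) : pvUpdMax (some m) d = some (max m d) := by
  simp only [pvUpdMax]
  by_cases h : d ≤ m
  · rw [if_neg (by omega), max_eq_left h]
  · rw [if_pos (by omega), max_eq_right (by omega)]

theorem pvFoldMin_some (P : List Int) : ∀ m : Int, P.foldl pvUpdMin (some m) = some (P.foldl min m) := by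
  induction P with
  | nil => intro m; rfl
  | cons d rest ih =>
    intro m
    simp only [List.foldl_cons, pvUpdMin_some]
    exact ih (min m d)

theorem pvFoldMax_some (P : List Int) : ∀ m : Int, P.foldl pvUpdMax (some m) = some (P.foldl max m) := by
  induction P with
  | nil => intro m; rfl
  | cons d rest ih =>
    intro m
    simp only [List.foldl_cons, pvUpdMax_some]
    exact ih (max m d)

theorem pvFoldMin_none (P : List Int) : P.foldl pvUpdMin none = P.min? := by
  cases P with
  | nil => rfl
  | cons d rest =>
    simp only [List.foldl_cons]
    show rest.foldl pvUpdMin (some d) = _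
    rw [pvFoldMin_some, List.min?_cons']

theorem pvFoldMax_none (P : List Int) : P.foldl pvUpdMax none = P.max? := by
  cases P with
  | nil => rfl
  | cons d rest =>
    simp only [List.foldl_cons]
    show rest.foldl pvUpdMax (some d) = _
    rw [pvFoldMax_some, List.max?_cons']

-- B's single pass computes total, the positive-delta sum/count and the two extrema
theorem pvBfold_aux (k : Int) (xs : List Int) : ∀ (t s c : Int) (mp mn : Option Int),
    xs.foldl (pvBStep k) (t, s, c, mp, mn) =
      (t + xs.sum,
       s + ((xs.map (fun x => PySem.Int.bxor x k - x)).filter (fun d => decide (0 < d))).sum,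
       c + (((xs.map (fun x => PySem.Int.bxor x k - x)).filter (fun d => decide (0 < d))).length : Int),
       ((xs.map (fun x => PySem.Int.bxor x k - x)).filter (fun d => decide (0 < d))).foldl pvUpdMin mp,
       ((xs.map (fun x => PySem.Int.bxor x k - x)).filter (fun d => !decide (0 < d))).foldl pvUpdMax mn) := by
  induction xs with
  | nil => intro t s c mp mn; simp
  | cons x xs ih =>
    intro t s c mp mn
    by_cases hd : 0 < PySem.Int.bxor x k - x
    · have hstep : pvBStep k (t, s, c, mp, mn) x
          = (t + x, s + (PySem.Int.bxor x k - x), c + 1, pvUpdMin mp (PySem.Int.bxor x k - x), mn) := by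
        simp only [pvBStep, pvUpdMin, if_pos hd]
      simp only [List.foldl_cons, hstep, ih, List.map_cons, List.filter_cons,
        decide_eq_true_eq, if_pos hd, List.sum_cons, List.length_cons, List.foldl_cons,
        Prod.mk.injEq]
      have hb : (!decide (0 < PySem.Int.bxor x k - x)) = false := by simp; omega
      rw [hb]
      and_intros
      all_goals try trivial
      all_goals try (push_cast; ring)
    · have hstep : pvBStep k (t, s, c, mp, mn) x
          = (t + x, s, c, mp, pvUpdMax mn (PySem.Int.bxor x k - x)) := by
        simp only [pvBStep, pvUpdMax, if_neg hd]
      simp only [List.foldl_cons, hstep, ih, List.map_cons, List.filter_cons,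
        decide_eq_true_eq, if_neg hd, List.sum_cons, Prod.mk.injEq]
      have hb : (!decide (0 < PySem.Int.bxor x k - x)) = true := by simp; omega
      rw [hb]
      and_intros
      all_goals try trivial
      all_goals try (push_cast; ring)

-- B's return value is nums.sum + pvT of the delta list
theorem pvAlt_eq (nums : List Int) (k : Int) (edges : List (List Int)) :
    maximumValueSumGreedy_alt nums k edges
      = nums.sum + pvT (nums.map (fun x => PySem.Int.bxor x k - x)) := by
  simp only [maximumValueSumGreedy_alt, pvBfold_aux k nums 0 0 0 none none, zero_add,
    pvFoldMin_none, pvFoldMax_none]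
  set D := nums.map (fun x => PySem.Int.bxor x k - x) with hD
  set P := D.filter (fun d => decide (0 < d)) with hP
  set N := D.filter (fun d => !decide (0 < d)) with hN
  have hmod : PySem.Int.mod ((P.length : Int)) 2 = 0 ↔ P.length % 2 = 0 := by
    simp [PySem.Int.mod, Int.fmod_eq_emod]
    omega
  simp only [pvT]
  by_cases hev : P.length % 2 = 0
  · rw [if_pos (hmod.mpr hev), if_pos hev]
  · rw [if_neg (fun hc => hev (hmod.mp hc)), if_neg hev]

-- A's return value is the same, via the bridge and the sorted-list lemma
theorem pvA_eq (nums : List Int) (k : Int) (edges : List (List Int)) :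
    maximumValueSumGreedy nums k edges
      = nums.sum + pvT (nums.map (fun x => PySem.Int.bxor x k - x)) := by
  simp only [maximumValueSumGreedy]
  set D := nums.map (fun x => PySem.Int.bxor x k - x) with hD
  have hNet : (PySem.List.pyRange 0 (nums.length : Int) 1).map
      (fun i => PySem.Int.bxor (PySem.List.pyGetD nums i 0) k - PySem.List.pyGetD nums i 0) = D := by
    have hcomp : (fun i => PySem.Int.bxor (PySem.List.pyGetD nums i 0) k - PySem.List.pyGetD nums i 0)
        = (fun x => PySem.Int.bxor x k - x) ∘ (fun i => PySem.List.pyGetD nums i 0) := rfl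
    rw [hcomp, ← List.map_map, PySem.List.map_pyGetD_pyRange_zero']
  rw [hNet]
  set nc := PySem.List.sorted D (fun x => x) true with hnc
  have hperm : nc.Perm D := PySem.List.sorted_perm D (fun x => x) true
  have hlen : (nums.length : Int) = (nc.length : Int) := by
    rw [hperm.length_eq]
    simp [hD]
  rw [hlen]
  rw [pvBridge nc nc 0 nums.sum (by omega) (by simp) (by simp)]
  rw [pairLoop_eq_pvT nc (by simpa using PySem.List.sorted_pairwise_rev D (fun x => x))]
  rw [pvT_perm nc D hperm]

-- ===== VERDICT (by name: the statement is the Claim_ definition above) =====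
theorem maximumValueSumGreedy_spec : Claim_equal_maximumValueSumGreedy := by
  intro nums k edges _
  unfold Spec_maximumValueSumGreedy
  rw [pvA_eq nums k edges, pvAlt_eq nums k edges]
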